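-- pv_equiv track=rewrite | github.com/RasikhAli/Superior-Academic-Tool | app.py | parse_multiple_teachers
-- ===== SOURCE A (Python) =====
-- prefix_hierarchy = ["Ms", "Mrs", "Miss", "Ma'am", "Maam", "Mr", "Sir", "Dr", "Prof"]
--
-- def parse_multiple_teachers(teachers_str):
--     """Parse multiple teachers from a string like 'Mr. John Mr. Jane Dr. Smith'"""
--     teachers_str = teachers_str.strip()
--     if not teachers_str:
--         return []
--
--     teachers = []
--     current_teacher = ""
--     words = teachers_str.split()
--
--     for word in words:
--         # Check if this word is a prefix (start of new teacher name)
--         if any(word.upper().startswith(prefix.upper()) for prefix in prefix_hierarchy):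
--             # If we have a current teacher, add it to the list
--             if current_teacher.strip():
--                 teachers.append(current_teacher.strip().upper())
--             # Start new teacher name
--             current_teacher = word
--         else:
--             # Continue building current teacher name
--             current_teacher += " " + word
--
--     # Add the last teacher
--     if current_teacher.strip():
--         teachers.append(current_teacher.strip().upper())
--
--     return teachers
-- ===== SOURCE B (Python) =====
-- prefix_hierarchy = ["Ms", "Mrs", "Miss", "Ma'am", "Maam", "Mr", "Sir", "Dr", "Prof"]
--
-- def parse_multiple_teachers(teachers_str):
--     """Split the word list at prefix words: each segment [start of a new
--     teacher] runs until the next prefix word; join, uppercase."""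
--     def is_prefix_word(word):
--         return any(word.upper().startswith(p.upper()) for p in prefix_hierarchy)
--
--     def segments(words):
--         if not words:
--             return []
--         k = 1
--         while k < len(words) and not is_prefix_word(words[k]):
--             k += 1
--         return [words[:k]] + segments(words[k:])
--
--     return [' '.join(seg).upper() for seg in segments(teachers_str.split())]
-- ===== Notes on version B (the rewrite author's own statement) =====
-- stated objective: alternative
-- what changed: Replaces A's single fold with a mutable string accumulator and repeated strip/empty checks by a recursive segmentation of the word list at prefix words (inner index scan per segment), each segment joined and uppercased directly, with no accumulator and no strip/empty guards.
import Mathlib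
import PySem

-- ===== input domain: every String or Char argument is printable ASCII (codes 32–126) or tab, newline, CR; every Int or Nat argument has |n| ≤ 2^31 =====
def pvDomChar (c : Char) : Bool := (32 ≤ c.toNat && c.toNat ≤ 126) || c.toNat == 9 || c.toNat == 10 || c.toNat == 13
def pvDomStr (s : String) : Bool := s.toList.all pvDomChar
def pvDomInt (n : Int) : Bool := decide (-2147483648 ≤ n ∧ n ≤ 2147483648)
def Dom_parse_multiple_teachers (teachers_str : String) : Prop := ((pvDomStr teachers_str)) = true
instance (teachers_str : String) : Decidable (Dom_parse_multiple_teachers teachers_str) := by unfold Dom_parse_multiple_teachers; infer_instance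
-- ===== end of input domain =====

-- B re-implements A by segmenting the word list at prefix words instead of folding with a string accumulator; same values everywhere (objective: alternative).

-- ===== PORT A =====
def prefix_hierarchy : List String := ["Ms", "Mrs", "Miss", "Ma'am", "Maam", "Mr", "Sir", "Dr", "Prof"]

-- shared predicate: any(word.upper().startswith(prefix.upper()) for prefix in prefix_hierarchy)
def isPrefixWord (word : String) : Bool :=
  prefix_hierarchy.any (fun p => PySem.Str.startswith (PySem.Str.upper word) (PySem.Str.upper p))

def parse_multiple_teachers (teachers_str : String) : List String :=
  let ts := PySem.Str.strip teachers_str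
  if ts = "" then []
  else
    let words := PySem.Str.split₀ ts
    let st := words.foldl (fun (st : List String × String) word =>
      if isPrefixWord word then
        ((if PySem.Str.strip st.2 ≠ "" then st.1 ++ [PySem.Str.upper (PySem.Str.strip st.2)] else st.1), word)
      else
        (st.1, st.2 ++ " " ++ word)) ([], "")
    if PySem.Str.strip st.2 ≠ "" then st.1 ++ [PySem.Str.upper (PySem.Str.strip st.2)] else st.1

-- ===== PORT B =====
-- B's inner index scan `k` is exactly takeWhile/dropWhile on the tail (words[:k] = head :: takeWhile, words[k:] = dropWhile)
def pvSegments : List String → List (List String)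
  | [] => []
  | w :: rest =>
      (w :: rest.takeWhile (fun x => !isPrefixWord x)) :: pvSegments (rest.dropWhile (fun x => !isPrefixWord x))
termination_by words => words.length
decreasing_by
  have h := List.length_dropWhile_le (fun x => !isPrefixWord x) rest
  simp only [List.length_cons]
  omega

def parse_multiple_teachers_alt (teachers_str : String) : List String :=
  (pvSegments (PySem.Str.split₀ teachers_str)).map (fun seg => PySem.Str.upper (PySem.Str.join " " seg))

-- ===== PRECONDITION & SPEC =====
def Spec_parse_multiple_teachers (teachers_str : String) (out : List String) : Prop := out = parse_multiple_teachers_alt teachers_str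
instance (teachers_str : String) (out : List String) : Decidable (Spec_parse_multiple_teachers teachers_str out) := by unfold Spec_parse_multiple_teachers; infer_instance

-- ===== CLAIM (what is proved, stated in full; the proofs are below) =====
def Claim_equal_parse_multiple_teachers : Prop := ∀ (teachers_str : String), Dom_parse_multiple_teachers teachers_str → Spec_parse_multiple_teachers teachers_str (parse_multiple_teachers teachers_str)

-- ===== LEMMAS AND PROOFS =====

-- ---- facts about PySem.Chars.split₀.go ----

theorem go_all_space (t : List Char) (ht : ∀ c ∈ t, PySem.Chars.isspace c = true) :
    ∀ cur acc, PySem.Chars.split₀.go t cur acc = PySem.Chars.split₀.go [] cur acc := by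
  induction t with
  | nil => intro cur acc; rfl
  | cons c rest ih =>
      intro cur acc
      have hc : PySem.Chars.isspace c = true := ht c (by simp)
      have hrest : ∀ c ∈ rest, PySem.Chars.isspace c = true := fun d hd => ht d (by simp [hd])
      by_cases hcur : cur = []
      · subst hcur
        simp [PySem.Chars.split₀.go, hc, ih hrest]
      · simp [PySem.Chars.split₀.go, hc, List.isEmpty_iff, hcur, ih hrest]

theorem go_append_space (t : List Char) (ht : ∀ c ∈ t, PySem.Chars.isspace c = true) :
    ∀ s cur acc, PySem.Chars.split₀.go (s ++ t) cur acc = PySem.Chars.split₀.go s cur acc := by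
  intro s
  induction s with
  | nil => intro cur acc; simpa using go_all_space t ht cur acc
  | cons c rest ih =>
      intro cur acc
      by_cases hc : PySem.Chars.isspace c = true
      · by_cases hcur : cur = []
        · subst hcur; simp [PySem.Chars.split₀.go, hc, ih]
        · simp [PySem.Chars.split₀.go, hc, List.isEmpty_iff, hcur, ih]
      · simp [PySem.Chars.split₀.go, hc, ih]

theorem go_lstrip (s : List Char) :
    ∀ acc, PySem.Chars.split₀.go (List.dropWhile PySem.Chars.isspace s) [] acc
      = PySem.Chars.split₀.go s [] acc := by
  induction s with
  | nil => intro acc; rfl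
  | cons c rest ih =>
      intro acc
      by_cases hc : PySem.Chars.isspace c = true
      · simpa [hc, PySem.Chars.split₀.go] using ih acc
      · simp [List.dropWhile_cons, hc]

theorem split0_rstrip (u : List Char) :
    PySem.Chars.split₀ (PySem.Chars.rstrip u) = PySem.Chars.split₀ u := by
  have hdecomp : PySem.Chars.rstrip u ++ (List.takeWhile PySem.Chars.isspace u.reverse).reverse = u := by
    unfold PySem.Chars.rstrip
    rw [← List.reverse_append, List.takeWhile_append_dropWhile, List.reverse_reverse]
  have hsp : ∀ c ∈ (List.takeWhile PySem.Chars.isspace u.reverse).reverse, PySem.Chars.isspace c = true := by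
    intro c hc
    exact List.mem_takeWhile_imp (List.mem_reverse.mp hc)
  unfold PySem.Chars.split₀
  conv_rhs => rw [← hdecomp]
  rw [go_append_space _ hsp]

theorem split0_strip (l : List Char) :
    PySem.Chars.split₀ (PySem.Chars.strip l) = PySem.Chars.split₀ l := by
  unfold PySem.Chars.strip
  rw [split0_rstrip]
  unfold PySem.Chars.lstrip PySem.Chars.split₀
  exact go_lstrip l []

theorem go_ne_nil (s : List Char) :
    ∀ cur acc, (cur ≠ [] ∨ acc ≠ ([] : List (List Char))) → PySem.Chars.split₀.go s cur acc ≠ [] := by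
  induction s with
  | nil =>
      intro cur acc h
      rcases h with h | h
      · simp [PySem.Chars.split₀.go, h]
      · by_cases hcur : cur = []
        · subst hcur; simp [PySem.Chars.split₀.go, h]
        · simp [PySem.Chars.split₀.go, List.isEmpty_iff, hcur]
  | cons c rest ih =>
      intro cur acc h
      by_cases hc : PySem.Chars.isspace c = true
      · by_cases hcur : cur = []
        · subst hcur
          simp only [PySem.Chars.split₀.go, hc, if_true, List.isEmpty_nil]
          exact ih [] acc (Or.inr (h.resolve_left (by simp)))
        · simp only [PySem.Chars.split₀.go, hc, if_true, List.isEmpty_iff, hcur, if_false]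
          exact ih [] (cur.reverse :: acc) (Or.inr (by simp))
      · simp only [PySem.Chars.split₀.go, hc]
        exact ih (c :: cur) acc (Or.inl (by simp))

theorem dropWhile_head_false {p : Char → Bool} {l : List Char} {c : Char} {t : List Char}
    (h : List.dropWhile p l = c :: t) : p c = false := by
  induction l with
  | nil => simp at h
  | cons d rest ih =>
      by_cases hd : p d = true
      · rw [List.dropWhile_cons, if_pos hd] at h; exact ih h
      · rw [List.dropWhile_cons, if_neg hd] at h
        cases h; simpa using hd

theorem split0_ne_nil (l : List Char) (h : PySem.Chars.strip l ≠ []) :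
    PySem.Chars.split₀ l ≠ [] := by
  have hls : List.dropWhile PySem.Chars.isspace l ≠ [] := by
    intro hcon
    apply h
    unfold PySem.Chars.strip PySem.Chars.lstrip
    rw [hcon]
    rfl
  unfold PySem.Chars.split₀
  rw [← go_lstrip l []]
  rcases hd : List.dropWhile PySem.Chars.isspace l with _ | ⟨c, t⟩
  · exact absurd hd hls
  · have hc : PySem.Chars.isspace c = false := dropWhile_head_false hd
    simp only [PySem.Chars.split₀.go, hc]
    exact go_ne_nil t [c] [] (Or.inl (by simp))

-- every word split() returns is nonempty and whitespace-free
theorem go_good (s : List Char) :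
    ∀ cur acc, (∀ c ∈ cur, PySem.Chars.isspace c = false) →
      (∀ w ∈ acc, w ≠ [] ∧ ∀ c ∈ w, PySem.Chars.isspace c = false) →
      ∀ w ∈ PySem.Chars.split₀.go s cur acc, w ≠ [] ∧ ∀ c ∈ w, PySem.Chars.isspace c = false := by
  induction s with
  | nil =>
      intro cur acc hcur hacc w hw
      by_cases hc : cur = []
      · subst hc
        simp only [PySem.Chars.split₀.go, List.isEmpty_nil, if_true, List.mem_reverse] at hw
        exact hacc w hw
      · simp only [PySem.Chars.split₀.go, List.isEmpty_iff, hc, if_false, List.mem_reverse,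
          List.mem_cons] at hw
        rcases hw with hw | hw
        · subst hw
          exact ⟨by simpa using hc, fun c hcmem => hcur c (List.mem_reverse.mp hcmem)⟩
        · exact hacc w hw
  | cons c rest ih =>
      intro cur acc hcur hacc w hw
      by_cases hc : PySem.Chars.isspace c = true
      · by_cases hcurnil : cur = []
        · subst hcurnil
          simp only [PySem.Chars.split₀.go, hc, if_true, List.isEmpty_nil] at hw
          exact ih [] acc (by simp) hacc w hw
        · simp only [PySem.Chars.split₀.go, hc, if_true, List.isEmpty_iff, hcurnil, if_false] at hw
          refine ih [] (cur.reverse :: acc) (by simp) ?_ w hw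
          intro v hv
          rcases List.mem_cons.mp hv with hv | hv
          · subst hv
            exact ⟨by simpa using hcurnil, fun d hd => hcur d (List.mem_reverse.mp hd)⟩
          · exact hacc v hv
      · simp only [PySem.Chars.split₀.go, hc] at hw
        refine ih (c :: cur) acc ?_ hacc w hw
        intro d hd
        rcases List.mem_cons.mp hd with hd | hd
        · subst hd; simpa using hc
        · exact hcur d hd

def StrGood (w : String) : Prop := w.toList ≠ [] ∧ ∀ c ∈ w.toList, PySem.Chars.isspace c = false

theorem split0_words_good (s : String) : ∀ w ∈ PySem.Str.split₀ s, StrGood w := by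
  intro w hw
  unfold PySem.Str.split₀ at hw
  rcases List.mem_map.mp hw with ⟨cs, hcs, rfl⟩
  have := go_good s.toList [] [] (by simp) (by simp) cs hcs
  exact ⟨by simpa using this.1, by simpa using this.2⟩

-- ---- strip is a no-op on (space-prefixed) joins of good words ----

theorem dropWhile_no_space {l : List Char} (h : ∀ c ∈ l, PySem.Chars.isspace c = false) :
    List.dropWhile PySem.Chars.isspace l = l := by
  cases l with
  | nil => rfl
  | cons c t => rw [List.dropWhile_cons, if_neg (by simp [h c (by simp)])]

theorem dropWhile_append_ne {p : Char → Bool} {a : List Char} (b : List Char)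
    (h : List.dropWhile p a ≠ []) :
    List.dropWhile p (a ++ b) = List.dropWhile p a ++ b := by
  induction a with
  | nil => simp at h
  | cons c t ih =>
      by_cases hc : p c = true
      · rw [List.dropWhile_cons, if_pos hc] at h ⊢
        rw [List.cons_append, List.dropWhile_cons, if_pos hc]
        exact ih h
      · rw [List.cons_append, List.dropWhile_cons, if_neg hc, List.dropWhile_cons, if_neg hc]
        rfl

theorem rstrip_no_space {w : List Char} (h : ∀ c ∈ w, PySem.Chars.isspace c = false) :
    PySem.Chars.rstrip w = w := by
  unfold PySem.Chars.rstrip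
  rw [dropWhile_no_space (fun c hc => h c (List.mem_reverse.mp hc)), List.reverse_reverse]

theorem rstrip_append {x y : List Char} (h : PySem.Chars.rstrip y ≠ []) :
    PySem.Chars.rstrip (x ++ y) = x ++ PySem.Chars.rstrip y := by
  unfold PySem.Chars.rstrip at *
  have hy : List.dropWhile PySem.Chars.isspace y.reverse ≠ [] := by
    intro hcon; rw [hcon] at h; simp at h
  rw [List.reverse_append, dropWhile_append_ne _ hy, List.reverse_append, List.reverse_reverse]

theorem join_good_rstrip {seg : List (List Char)} (hne : seg ≠ [])
    (hgood : ∀ w ∈ seg, w ≠ [] ∧ ∀ c ∈ w, PySem.Chars.isspace c = false) :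
    PySem.Chars.rstrip (PySem.Chars.join [' '] seg) = PySem.Chars.join [' '] seg ∧
      PySem.Chars.join [' '] seg ≠ [] := by
  induction seg with
  | nil => exact absurd rfl hne
  | cons w rest ih =>
      cases rest with
      | nil =>
          rw [PySem.Chars.join_singleton]
          exact ⟨rstrip_no_space (hgood w (by simp)).2, (hgood w (by simp)).1⟩
      | cons q rest' =>
          have hg' : ∀ v ∈ q :: rest', v ≠ [] ∧ ∀ c ∈ v, PySem.Chars.isspace c = false :=
            fun v hv => hgood v (by simp [List.mem_cons] at hv ⊢; tauto)
          obtain ⟨ih1, ih2⟩ := ih (by simp) hg'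
          rw [PySem.Chars.join_cons_cons]
          refine ⟨?_, by simp⟩
          rw [rstrip_append (by rw [ih1]; exact ih2), ih1]

theorem lstrip_space_append {sep : List Char} (x : List Char)
    (h : ∀ c ∈ sep, PySem.Chars.isspace c = true) :
    PySem.Chars.lstrip (sep ++ x) = PySem.Chars.lstrip x := by
  unfold PySem.Chars.lstrip
  induction sep with
  | nil => simp
  | cons c t ih =>
      rw [List.cons_append, List.dropWhile_cons, if_pos (by simp [h c (by simp)])]
      exact ih (fun d hd => h d (by simp [hd]))

theorem join_good_lstrip {seg : List (List Char)} (hne : seg ≠ [])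
    (hgood : ∀ w ∈ seg, w ≠ [] ∧ ∀ c ∈ w, PySem.Chars.isspace c = false) :
    PySem.Chars.lstrip (PySem.Chars.join [' '] seg) = PySem.Chars.join [' '] seg := by
  rcases seg with _ | ⟨w, rest⟩
  · exact absurd rfl hne
  have hw := hgood w (by simp)
  have hjoin : ∃ t, PySem.Chars.join [' '] (w :: rest) = w ++ t := by
    cases rest with
    | nil => exact ⟨[], by rw [PySem.Chars.join_singleton]; simp⟩
    | cons q r => exact ⟨[' '] ++ PySem.Chars.join [' '] (q :: r), by rw [PySem.Chars.join_cons_cons, List.append_assoc]⟩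
  obtain ⟨t, ht⟩ := hjoin
  rw [ht]
  unfold PySem.Chars.lstrip
  rcases hwc : w with _ | ⟨c, u⟩
  · exact absurd hwc hw.1
  rw [List.cons_append, List.dropWhile_cons,
    if_neg (by simp [hw.2 c (by rw [hwc]; simp)])]

theorem strip_sep_join {sep : List Char} {seg : List (List Char)}
    (hsep : ∀ c ∈ sep, PySem.Chars.isspace c = true) (hne : seg ≠ [])
    (hgood : ∀ w ∈ seg, w ≠ [] ∧ ∀ c ∈ w, PySem.Chars.isspace c = false) :
    PySem.Chars.strip (sep ++ PySem.Chars.join [' '] seg) = PySem.Chars.join [' '] seg := by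
  unfold PySem.Chars.strip
  rw [lstrip_space_append _ hsep, join_good_lstrip hne hgood,
    (join_good_rstrip hne hgood).1]

-- ---- Str-level versions ----

theorem toList_join_space (seg : List String) :
    (PySem.Str.join " " seg).toList = PySem.Chars.join [' '] (seg.map String.toList) := by
  unfold PySem.Str.join
  simp

theorem strGood_list {seg : List String} (h : ∀ w ∈ seg, StrGood w) :
    ∀ w ∈ seg.map String.toList, w ≠ [] ∧ ∀ c ∈ w, PySem.Chars.isspace c = false := by
  intro w hw
  rcases List.mem_map.mp hw with ⟨v, hv, rfl⟩
  exact h v hv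

theorem str_strip_sep_join {sep : String} {seg : List String}
    (hsep : ∀ c ∈ sep.toList, PySem.Chars.isspace c = true) (hne : seg ≠ [])
    (hgood : ∀ w ∈ seg, StrGood w) :
    PySem.Str.strip (sep ++ PySem.Str.join " " seg) = PySem.Str.join " " seg := by
  apply String.toList_inj.mp
  unfold PySem.Str.strip
  rw [String.toList_ofList, String.toList_append, toList_join_space,
    strip_sep_join hsep (by simpa using hne) (strGood_list hgood)]

theorem str_join_ne_empty {seg : List String} (hne : seg ≠ []) (hgood : ∀ w ∈ seg, StrGood w) :
    PySem.Str.join " " seg ≠ "" := by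
  intro hcon
  have := (join_good_rstrip (seg := seg.map String.toList) (by simpa using hne)
    (strGood_list hgood)).2
  apply this
  rw [← toList_join_space, hcon]
  rfl

theorem str_join_append_one {seg : List String} (w : String) (hne : seg ≠ []) :
    PySem.Str.join " " (seg ++ [w]) = PySem.Str.join " " seg ++ " " ++ w := by
  apply String.toList_inj.mp
  rw [String.toList_append, String.toList_append, toList_join_space, toList_join_space]
  have : ∀ (ws : List (List Char)) (v : List Char), ws ≠ [] →
      PySem.Chars.join [' '] (ws ++ [v]) = PySem.Chars.join [' '] ws ++ [' '] ++ v := by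
    intro ws
    induction ws with
    | nil => intro v h; exact absurd rfl h
    | cons x rest ih =>
        intro v _
        cases rest with
        | nil => rw [PySem.Chars.join_singleton]; simp [PySem.Chars.join_cons_cons]
        | cons y r =>
            simp only [List.cons_append] at ih ⊢
            rw [PySem.Chars.join_cons_cons, ih v (by simp), PySem.Chars.join_cons_cons]
            simp [List.append_assoc]
  rw [List.map_append]
  simpa using this (seg.map String.toList) w.toList (by simpa using hne)

-- ---- the fold/segmentation correspondence ----

def pvStep (st : List String × String) (word : String) : List String × String :=
  if isPrefixWord word then
    ((if PySem.Str.strip st.2 ≠ "" then st.1 ++ [PySem.Str.upper (PySem.Str.strip st.2)] else st.1), word)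
  else
    (st.1, st.2 ++ " " ++ word)

def pvFin (st : List String × String) : List String :=
  if PySem.Str.strip st.2 ≠ "" then st.1 ++ [PySem.Str.upper (PySem.Str.strip st.2)] else st.1

def pvUJ (seg : List String) : String := PySem.Str.upper (PySem.Str.join " " seg)

theorem main_invariant (ws : List String) :
    ∀ (ts : List String) (seg : List String) (sep : String),
      (sep = "" ∨ sep = " ") → seg ≠ [] → (∀ w ∈ seg, StrGood w) → (∀ w ∈ ws, StrGood w) →
      pvFin (List.foldl pvStep (ts, sep ++ PySem.Str.join " " seg) ws)
        = ts ++ ((seg ++ ws.takeWhile (fun w => !isPrefixWord w))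
            :: pvSegments (ws.dropWhile (fun w => !isPrefixWord w))).map pvUJ := by
  induction ws with
  | nil =>
      intro ts seg sep hsep hne hgood _
      have hsp : ∀ c ∈ sep.toList, PySem.Chars.isspace c = true := by
        rcases hsep with h | h <;> subst h <;> intro c hc <;> simp at hc
        subst hc; rfl
      simp only [List.foldl_nil, pvFin, str_strip_sep_join hsp hne hgood,
        List.takeWhile_nil, List.dropWhile_nil]
      rw [if_pos (str_join_ne_empty hne hgood)]
      simp [pvSegments, pvUJ]
  | cons w rest ih =>
      intro ts seg sep hsep hne hgood hws
      have hsp : ∀ c ∈ sep.toList, PySem.Chars.isspace c = true := by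
        rcases hsep with h | h <;> subst h <;> intro c hc <;> simp at hc
        subst hc; rfl
      have hwgood : StrGood w := hws w (by simp)
      have hrest : ∀ v ∈ rest, StrGood v := fun v hv => hws v (by simp [hv])
      by_cases hp : isPrefixWord w = true
      · have hstep : pvStep (ts, sep ++ PySem.Str.join " " seg) w
            = (ts ++ [pvUJ seg], w) := by
          unfold pvStep
          rw [if_pos hp, str_strip_sep_join hsp hne hgood,
            if_pos (str_join_ne_empty hne hgood)]
          rfl
        have hw' : w = "" ++ PySem.Str.join " " [w] := by
          unfold PySem.Str.join
          apply String.toList_inj.mp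
          rw [String.toList_append]
          simp [PySem.Chars.join_singleton]
        rw [List.foldl_cons, hstep]
        conv_lhs => rw [show ((ts ++ [pvUJ seg], w) : List String × String)
          = (ts ++ [pvUJ seg], "" ++ PySem.Str.join " " [w]) from by rw [← hw']]
        rw [ih (ts ++ [pvUJ seg]) [w] "" (Or.inl rfl) (by simp)
          (by intro v hv; simp at hv; subst hv; exact hwgood) hrest]
        have hseg : pvSegments (w :: rest)
          = (w :: rest.takeWhile (fun x => !isPrefixWord x))
              :: pvSegments (rest.dropWhile (fun x => !isPrefixWord x)) := by
            rw [pvSegments]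
        simp [hseg, hp, List.append_assoc]
      · have hp' : isPrefixWord w = false := by simpa using hp
        have hstep : pvStep (ts, sep ++ PySem.Str.join " " seg) w
            = (ts, sep ++ PySem.Str.join " " (seg ++ [w])) := by
          unfold pvStep
          rw [if_neg (by simp [hp']), str_join_append_one w hne]
          simp [String.append_assoc]
        rw [List.foldl_cons, hstep,
          ih ts (seg ++ [w]) sep hsep (by simp)
            (by intro v hv; rcases List.mem_append.mp hv with hv | hv
                · exact hgood v hv
                · simp at hv; subst hv; exact hwgood) hrest]
        rw [List.takeWhile_cons, List.dropWhile_cons]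
        simp [hp', List.append_assoc]

theorem parse_main : ∀ s : String, parse_multiple_teachers s = parse_multiple_teachers_alt s := by
  intro s
  unfold parse_multiple_teachers parse_multiple_teachers_alt
  by_cases hstrip : PySem.Str.strip s = ""
  · rw [if_pos hstrip]
    have : PySem.Str.split₀ s = [] := by
      unfold PySem.Str.split₀
      have : PySem.Chars.split₀ s.toList = PySem.Chars.split₀ (PySem.Chars.strip s.toList) :=
        (split0_strip s.toList).symm
      rw [this]
      have h2 : PySem.Chars.strip s.toList = [] := by
        have := congrArg String.toList hstrip
        unfold PySem.Str.strip at this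
        simpa using this
      rw [h2]
      rfl
    rw [this]
    have hnil : pvSegments [] = [] := by rw [pvSegments]
    rw [hnil]
    rfl
  · rw [if_neg hstrip]
    have hsplit : PySem.Str.split₀ (PySem.Str.strip s) = PySem.Str.split₀ s := by
      unfold PySem.Str.split₀ PySem.Str.strip
      rw [String.toList_ofList, split0_strip]
    rw [hsplit]
    have hgoodall := split0_words_good s
    have hne : PySem.Str.split₀ s ≠ [] := by
      unfold PySem.Str.split₀
      intro hcon
      apply split0_ne_nil s.toList
      · intro h2
        apply hstrip
        apply String.toList_inj.mp
        unfold PySem.Str.strip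
        rw [String.toList_ofList, h2]
        rfl
      · simpa using hcon
    rcases hws : PySem.Str.split₀ s with _ | ⟨w, rest⟩
    · exact absurd hws hne
    have hwgood : StrGood w := hgoodall w (by rw [hws]; simp)
    have hrest : ∀ v ∈ rest, StrGood v := fun v hv => hgoodall v (by rw [hws]; simp [hv])
    show pvFin (List.foldl pvStep ([], "") (w :: rest)) = _
    rw [List.foldl_cons]
    have hjw : PySem.Str.join " " [w] = w := by
      apply String.toList_inj.mp
      simp [PySem.Str.join, PySem.Chars.join_singleton]
    have hq : PySem.Str.strip ("" : String) = "" := rfl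
    by_cases hp : isPrefixWord w = true
    · have hstep : pvStep ([], "") w = ([], "" ++ PySem.Str.join " " [w]) := by
        unfold pvStep
        rw [if_pos hp, hq, if_neg (by simp), hjw]
        simp
      rw [hstep, main_invariant rest [] [w] "" (Or.inl rfl) (by simp)
        (by intro v hv; simp at hv; subst hv; exact hwgood) hrest]
      rw [show pvSegments (w :: rest)
        = (w :: rest.takeWhile (fun x => !isPrefixWord x))
            :: pvSegments (rest.dropWhile (fun x => !isPrefixWord x)) from by rw [pvSegments]]
      simp [pvUJ]
    · have hp' : isPrefixWord w = false := by simpa using hp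
      have hstep : pvStep ([], "") w = ([], " " ++ PySem.Str.join " " [w]) := by
        unfold pvStep
        rw [if_neg (by simp [hp']), hjw]
        simp
      rw [hstep, main_invariant rest [] [w] " " (Or.inr rfl) (by simp)
        (by intro v hv; simp at hv; subst hv; exact hwgood) hrest]
      rw [show pvSegments (w :: rest)
        = (w :: rest.takeWhile (fun x => !isPrefixWord x))
            :: pvSegments (rest.dropWhile (fun x => !isPrefixWord x)) from by rw [pvSegments]]
      simp [pvUJ]

-- ===== VERDICT (by name: the statement is the Claim_ definition above) =====
theorem parse_multiple_teachers_spec : Claim_equal_parse_multiple_teachers := by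
  intro s _
  unfold Spec_parse_multiple_teachers
  exact parse_main s
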